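-- pv_equiv track=rewrite | github.com/KwakNW/Studying-for-Coding | Programmers/Level1/키패드 누르기.py | solution
-- ===== SOURCE A (Python) =====
-- def solution(numbers, hand):
--     answer = ''
--     l_hand = 10
--     r_hand = 12
--
--     for num in numbers:
--         if num in [1, 4, 7]:
--             answer += "L"
--             l_hand = num
--         elif num in [3, 6, 9]:
--             answer += "R"
--             r_hand = num
--         else:
--             if num == 0:
--                 num = 11
--
--             # 거리 측정
--             l_dis = (abs(num - l_hand) // 3) + (abs(num - l_hand) % 3)
--             r_dis = (abs(num - r_hand) // 3) + (abs(num - r_hand) % 3)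
--
--             if l_dis < r_dis:
--                 answer += "L"
--                 l_hand = num
--             elif l_dis > r_dis:
--                 answer+= "R"
--                 r_hand = num
--             else:
--                 if hand == "right":
--                     answer += "R"
--                     r_hand = num
--                 else:
--                     answer += "L"
--                     l_hand = num
--
--     return answer
-- ===== SOURCE B (Python) =====
-- def _last_press(history, side, default):
--     for key, letter in reversed(history):
--         if letter == side:
--             return key
--     return default
--
--
-- def solution(numbers, hand):
--     history = []
--     for num in numbers:
--         key = 11 if num == 0 else num
--         if key in (1, 4, 7):
--             side = 'L'
--         elif key in (3, 6, 9):
--             side = 'R'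
--         else:
--             dl = sum(divmod(abs(key - _last_press(history, 'L', 10)), 3))
--             dr = sum(divmod(abs(key - _last_press(history, 'R', 12)), 3))
--             side = 'L' if dl < dr or (dl == dr and hand != 'right') else 'R'
--         history.append((key, side))
--     return ''.join(letter for _, letter in history)
-- ===== Notes on version B (the rewrite author's own statement) =====
-- stated objective: alternative
-- what changed: B carries no thumb-position state: it appends (key, side) records to a press log and, at each middle-column key, re-derives each thumb's position by scanning the log backwards for that hand's most recent press (falling back to the * / # seeds 10 and 12), with the 0-to-11 normalisation hoisted before the branching and the four-way decision collapsed into one ordered condition; the position variables and their three duplicated update blocks disappear.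
import Mathlib
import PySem

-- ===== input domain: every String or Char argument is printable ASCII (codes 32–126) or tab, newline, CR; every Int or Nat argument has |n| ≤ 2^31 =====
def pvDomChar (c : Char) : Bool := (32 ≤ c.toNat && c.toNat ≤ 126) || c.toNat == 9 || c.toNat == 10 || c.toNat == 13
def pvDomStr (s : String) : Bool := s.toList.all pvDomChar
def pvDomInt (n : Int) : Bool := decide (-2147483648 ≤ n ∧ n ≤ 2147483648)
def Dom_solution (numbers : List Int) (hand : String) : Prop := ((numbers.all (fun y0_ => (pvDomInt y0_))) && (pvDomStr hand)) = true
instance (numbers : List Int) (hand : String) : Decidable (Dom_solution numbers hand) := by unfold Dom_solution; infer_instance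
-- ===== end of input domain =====

-- B replaces A's two carried thumb-position variables by a press log scanned backwards for
-- each hand's last press: a stateless alternative of the same typical cost.


-- ===== PORT A =====
-- the body of A's for-loop, as a named step function over the state (answer, l_hand, r_hand)
def stepA (hand : String) : String × Int × Int → Int → String × Int × Int :=
  fun (answer, l_hand, r_hand) num =>
    if num = 1 ∨ num = 4 ∨ num = 7 then (answer ++ "L", num, r_hand)
    else if num = 3 ∨ num = 6 ∨ num = 9 then (answer ++ "R", l_hand, num)
    else
      let num := if num = 0 then 11 else num
      let l_dis := PySem.Int.floordiv |num - l_hand| 3 + PySem.Int.mod |num - l_hand| 3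
      let r_dis := PySem.Int.floordiv |num - r_hand| 3 + PySem.Int.mod |num - r_hand| 3
      if l_dis < r_dis then (answer ++ "L", num, r_hand)
      else if r_dis < l_dis then (answer ++ "R", l_hand, num)
      else if hand = "right" then (answer ++ "R", l_hand, num)
      else (answer ++ "L", num, r_hand)

def solution (numbers : List Int) (hand : String) : String :=
  (numbers.foldl (stepA hand) ("", 10, 12)).1

-- ===== PORT B =====
-- _last_press's for-loop over reversed(history): recursion on the reversed list
def lastPressRev (rev : List (Int × String)) (side : String) (dflt : Int) : Int :=
  match rev with
  | [] => dflt
  | (key, letter) :: rest => if letter == side then key else lastPressRev rest side dflt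

def lastPress (history : List (Int × String)) (side : String) (dflt : Int) : Int :=
  lastPressRev history.reverse side dflt

-- the body of B's for-loop over the state `history`
def stepB (hand : String) : List (Int × String) → Int → List (Int × String) :=
  fun history num =>
    let key := if num = 0 then 11 else num
    let side :=
      if key = 1 ∨ key = 4 ∨ key = 7 then "L"
      else if key = 3 ∨ key = 6 ∨ key = 9 then "R"
      else
        let dl := (PySem.Int.divmod? |key - lastPress history "L" 10| 3).getD (0, 0)
        let dr := (PySem.Int.divmod? |key - lastPress history "R" 12| 3).getD (0, 0)
        if dl.1 + dl.2 < dr.1 + dr.2 ∨ (dl.1 + dl.2 = dr.1 + dr.2 ∧ hand ≠ "right") then "L"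
        else "R"
    history ++ [(key, side)]

def solution_alt (numbers : List Int) (hand : String) : String :=
  PySem.Str.join "" ((numbers.foldl (stepB hand) []).map (·.2))

-- ===== PRECONDITION & SPEC =====
def Spec_solution (numbers : List Int) (hand : String) (out : String) : Prop := out = solution_alt numbers hand
instance (numbers : List Int) (hand : String) (out : String) : Decidable (Spec_solution numbers hand out) := by unfold Spec_solution; infer_instance

-- ===== CLAIM (what is proved, stated in full; the proofs are below) =====
def Claim_equal_solution : Prop := ∀ (numbers : List Int) (hand : String), Dom_solution numbers hand → Spec_solution numbers hand (solution numbers hand)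

-- ===== LEMMAS AND PROOFS =====

-- ''.join with empty separator is list concatenation
lemma inter_nil : ∀ (xss : List (List Char)), ([] : List Char).intercalate xss = xss.flatten
  | [] => by simp [List.intercalate]
  | [a] => by simp [List.intercalate]
  | a :: b :: t => by
    have ih := inter_nil (b :: t)
    simp only [List.intercalate, List.intersperse] at ih ⊢
    simp [ih]

lemma join_snoc (ls : List String) (s : String) :
    PySem.Str.join "" (ls ++ [s]) = PySem.Str.join "" ls ++ s := by
  simp [PySem.Str.join, PySem.Chars.join, inter_nil, String.ofList_append]

-- appending a press to the log: the backward scan sees it first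
lemma lastPress_snoc (h : List (Int × String)) (k : Int) (s side : String) (d : Int) :
    lastPress (h ++ [(k, s)]) side d = if s == side then k else lastPress h side d := by
  simp [lastPress, lastPressRev]

-- one step of A and one step of B press the same side, and B's log keeps A's thumb positions
lemma step_rel (hand a : String) (h : List (Int × String)) (l r num : Int)
    (hl : lastPress h "L" 10 = l) (hr : lastPress h "R" 12 = r) :
    ∃ (s : String) (l' r' : Int),
      stepA hand (a, l, r) num = (a ++ s, l', r') ∧
      stepB hand h num = h ++ [(if num = 0 then 11 else num, s)] ∧
      lastPress (stepB hand h num) "L" 10 = l' ∧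
      lastPress (stepB hand h num) "R" 12 = r' := by
  by_cases h1 : num = 1 ∨ num = 4 ∨ num = 7
  · have hz : ¬ num = 0 := by rcases h1 with h | h | h <;> omega
    refine ⟨"L", num, r, by simp [stepA, h1], ?_, ?_, ?_⟩ <;>
      simp [stepB, h1, hz, lastPress_snoc, hr]
  · by_cases h2 : num = 3 ∨ num = 6 ∨ num = 9
    · have hz : ¬ num = 0 := by rcases h2 with h | h | h <;> omega
      refine ⟨"R", l, num, by simp [stepA, h1, h2], ?_, ?_, ?_⟩ <;>
        simp [stepB, h1, h2, hz, lastPress_snoc, hl]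
    · set m : Int := if num = 0 then 11 else num with hm
      have hm1 : ¬ (m = 1 ∨ m = 4 ∨ m = 7) := by
        by_cases hz : num = 0
        · norm_num [hm, hz]
        · simp only [hm, if_neg hz]; exact h1
      have hm2 : ¬ (m = 3 ∨ m = 6 ∨ m = 9) := by
        by_cases hz : num = 0
        · norm_num [hm, hz]
        · simp only [hm, if_neg hz]; exact h2
      set dl : Int := |m - l| / 3 + |m - l| % 3 with hdl
      set dr : Int := |m - r| / 3 + |m - r| % 3 with hdr
      have hA : stepA hand (a, l, r) num =
          (if dl < dr then (a ++ "L", m, r)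
           else if dr < dl then (a ++ "R", l, m)
           else if hand = "right" then (a ++ "R", l, m) else (a ++ "L", m, r)) := by
        simp [stepA, h1, h2, ← hm, PySem.Int.floordiv, PySem.Int.mod,
          Int.fdiv_eq_ediv, Int.fmod_eq_emod, ← hdl, ← hdr]
      have hB : stepB hand h num =
          h ++ [(m, if dl < dr ∨ (dl = dr ∧ hand ≠ "right") then "L" else "R")] := by
        simp [stepB, hm1, hm2, ← hm, hl, hr, PySem.Int.divmod?,
          Int.fdiv_eq_ediv, Int.fmod_eq_emod, ← hdl, ← hdr]
      by_cases hc : dl < dr ∨ (dl = dr ∧ hand ≠ "right")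
      · have hB' : stepB hand h num = h ++ [(m, "L")] := by rw [hB, if_pos hc]
        refine ⟨"L", m, r, ?_, by rw [hB'], by simp [hB', lastPress_snoc],
          by simp [hB', lastPress_snoc, hr]⟩
        rw [hA]
        rcases hc with hc | ⟨hc1, hc2⟩
        · simp [hc]
        · simp [hc1, hc2]
      · have hnl : ¬ dl < dr := fun hlt => hc (Or.inl hlt)
        have himp : dl = dr → hand = "right" := fun he => by
          by_contra hn; exact hc (Or.inr ⟨he, hn⟩)
        have hB' : stepB hand h num = h ++ [(m, "R")] := by rw [hB, if_neg hc]
        refine ⟨"R", l, m, ?_, by rw [hB'], by simp [hB', lastPress_snoc, hl],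
          by simp [hB', lastPress_snoc]⟩
        rw [hA]
        by_cases hgt : dr < dl
        · simp [hnl, hgt]
        · have he : dl = dr := by omega
          simp [hnl, hgt, himp he]

lemma go (hand : String) (ns : List Int) :
    ∀ (a : String) (h : List (Int × String)) (l r : Int),
      a = PySem.Str.join "" (h.map (·.2)) →
      lastPress h "L" 10 = l → lastPress h "R" 12 = r →
      (ns.foldl (stepA hand) (a, l, r)).1
        = PySem.Str.join "" ((ns.foldl (stepB hand) h).map (·.2)) := by
  induction ns with
  | nil => intro a h l r ha _ _; simpa using ha
  | cons n rest ih =>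
    intro a h l r ha hl hr
    obtain ⟨s, l', r', eA, eB, hl', hr'⟩ := step_rel hand a h l r n hl hr
    simp only [List.foldl_cons, eA]
    have hkey : stepB hand h n = h ++ [(if n = 0 then 11 else n, s)] := eB
    have := ih (a ++ s) (stepB hand h n) l' r'
      (by simp [ha, hkey, join_snoc]) hl' hr'
    simpa [hkey] using this

-- ===== VERDICT (by name: the statement is the Claim_ definition above) =====
theorem solution_spec : Claim_equal_solution := by
  intro numbers hand _
  unfold Spec_solution solution solution_alt
  exact go hand numbers "" [] 10 12
    (by simp [PySem.Str.join, PySem.Chars.join, List.intercalate]) (by simp [lastPress, lastPressRev]) (by simp [lastPress, lastPressRev])
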